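-- pv_equiv track=rewrite | github.com/LarCorps/Epistemic-Verifier | epistemic_verifier/verifier.py | _build_sample_offsets
-- ===== SOURCE A (Python) =====
-- from typing import Optional, Dict, Any, Tuple, List, Set
--
-- def _build_sample_offsets(sample_sizes: List[int], chunk_offsets: List[int], stsc: List[Tuple[int, int]]) -> List[int]:
--     out = [0] * len(sample_sizes)
--
--     def samples_per_chunk_for(chunk_index1: int) -> int:
--         cur = stsc[0]
--         for e in stsc:
--             if e[0] <= chunk_index1: cur = e
--             else: break
--         return cur[1]
--
--     sample_index = 0
--     chunk = 1
--     while chunk <= len(chunk_offsets) and sample_index < len(sample_sizes):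
--         base = chunk_offsets[chunk - 1]
--         spc = samples_per_chunk_for(chunk)
--         off = base
--         n = 0
--         while n < spc and sample_index < len(sample_sizes):
--             out[sample_index] = off
--             off += sample_sizes[sample_index]
--             sample_index += 1
--             n += 1
--         chunk += 1
--     return out
-- ===== SOURCE B (Python) =====
-- def _build_sample_offsets(sample_sizes, chunk_offsets, stsc):
--     out = [0] * len(sample_sizes)
--     total = len(sample_sizes)
--     si = 0
--     k = 0  # first stsc index whose first_chunk exceeds the current chunk (monotone pointer)
--     for chunk, base in enumerate(chunk_offsets, start=1):
--         if si >= total: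
--             break
--         while k < len(stsc) and stsc[k][0] <= chunk:
--             k += 1
--         spc = stsc[k - 1][1] if k > 0 else stsc[0][1]
--         take = min(spc, total - si) if spc > 0 else 0
--         off = base
--         for i in range(si, si + take):
--             out[i] = off
--             off += sample_sizes[i]
--         si += take
--     return out
-- ===== Notes on version B (the rewrite author's own statement) =====
-- stated objective: faster
-- what changed: B replaces A's per-chunk linear rescan of the stsc table by a single monotone pointer advanced once across stsc, and replaces A's per-sample inner while-guard by a closed-form take = min(spc, remaining) per chunk.
import Mathlib
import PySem

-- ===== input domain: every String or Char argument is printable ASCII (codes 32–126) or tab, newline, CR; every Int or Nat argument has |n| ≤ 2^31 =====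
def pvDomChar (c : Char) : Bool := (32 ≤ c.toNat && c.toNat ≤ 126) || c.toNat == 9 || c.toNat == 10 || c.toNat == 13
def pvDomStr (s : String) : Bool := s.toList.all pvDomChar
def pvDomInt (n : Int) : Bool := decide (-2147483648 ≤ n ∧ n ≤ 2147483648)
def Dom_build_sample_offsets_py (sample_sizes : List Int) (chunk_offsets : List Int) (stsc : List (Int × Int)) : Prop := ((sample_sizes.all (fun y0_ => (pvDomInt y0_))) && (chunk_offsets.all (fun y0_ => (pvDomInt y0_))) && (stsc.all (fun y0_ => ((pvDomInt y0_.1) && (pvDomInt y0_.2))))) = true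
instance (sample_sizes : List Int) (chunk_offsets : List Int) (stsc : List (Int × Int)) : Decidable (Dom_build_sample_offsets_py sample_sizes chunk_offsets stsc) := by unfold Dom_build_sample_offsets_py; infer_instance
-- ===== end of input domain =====

-- B replaces A's per-chunk rescans of stsc by a single monotone pointer over stsc and a
-- closed-form `take = min(spc, remaining)` per chunk (objective: faster, asymptotic).

-- ===== PORT A =====
-- samples_per_chunk_for: the for-loop over stsc with its break, `cur` as accumulator.
def spcGoA (chunk : Int) : List (Int × Int) → (Int × Int) → (Int × Int)
  | [], cur => cur
  | e :: rest, cur => if e.1 ≤ chunk then spcGoA chunk rest e else cur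

-- `cur = stsc[0]`: headD is exact here because Pre_ excludes the inputs where Python's
-- stsc[0] raises (stsc = [] with both loops entered).
def spcForA (stsc : List (Int × Int)) (chunk : Int) : Int :=
  (spcGoA chunk stsc (stsc.headD (0, 0))).2

-- the inner while loop: `n < spc and sample_index < len(sample_sizes)`
-- (sizes.getD si 0 is exact: the loop guard gives si < sizes.length)
def innerA (sizes : List Int) (spc : Int) (out : List Int) (off : Int) (si : Nat) (n : Int) :
    List Int × Nat :=
  if h : n < spc ∧ si < sizes.length then
    innerA sizes spc (out.set si off) (off + sizes.getD si 0) (si + 1) (n + 1)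
  else (out, si)
termination_by sizes.length - si
decreasing_by omega

-- the outer while loop: `chunk <= len(chunk_offsets) and sample_index < len(sample_sizes)`
-- (co.getD (chunk-1) 0 is exact: the guard gives chunk - 1 < co.length)
def outerA (sizes co : List Int) (stsc : List (Int × Int)) (out : List Int) (si chunk : Nat) :
    List Int :=
  if h : chunk ≤ co.length ∧ si < sizes.length then
    let base := co.getD (chunk - 1) 0
    let spc := spcForA stsc (chunk : Int)
    let p := innerA sizes spc out base si 0
    outerA sizes co stsc p.1 p.2 (chunk + 1)
  else out
termination_by co.length + 1 - chunk
decreasing_by omega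

def build_sample_offsets_py (sample_sizes : List Int) (chunk_offsets : List Int)
    (stsc : List (Int × Int)) : List Int :=
  outerA sample_sizes chunk_offsets stsc (List.replicate sample_sizes.length 0) 0 1

-- ===== PORT B =====
-- the monotone-pointer advance: `while k < len(stsc) and stsc[k][0] <= chunk: k += 1`
def advB (stsc : List (Int × Int)) (chunk : Int) (k : Nat) : Nat :=
  if h : k < stsc.length ∧ (stsc.getD k (0, 0)).1 ≤ chunk then advB stsc chunk (k + 1) else k
termination_by stsc.length - k
decreasing_by omega

-- `for i in range(si, si + take): out[i] = off; off += sample_sizes[i]`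
def fillB (sizes : List Int) (out : List Int) (off : Int) (si : Nat) : Nat → List Int
  | 0 => out
  | t + 1 => fillB sizes (out.set si off) (off + sizes.getD si 0) (si + 1) t

-- the for-loop over enumerate(chunk_offsets, start=1) with its early break
-- (stsc.getD is exact: Pre_ excludes the inputs where Python's stsc[k-1]/stsc[0] raises)
def loopB (sizes : List Int) (stsc : List (Int × Int)) :
    List Int → Int → List Int → Nat → Nat → List Int
  | [], _, out, _, _ => out
  | base :: rest, chunk, out, si, k =>
    if sizes.length ≤ si then out
    else
      let k' := advB stsc chunk k
      let spc := if 0 < k' then (stsc.getD (k' - 1) (0, 0)).2 else (stsc.getD 0 (0, 0)).2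
      let take := if 0 < spc then min spc.toNat (sizes.length - si) else 0
      loopB sizes stsc rest (chunk + 1) (fillB sizes out base si take) (si + take) k'

def build_sample_offsets_py_alt (sample_sizes : List Int) (chunk_offsets : List Int)
    (stsc : List (Int × Int)) : List Int :=
  loopB sample_sizes stsc chunk_offsets 1 (List.replicate sample_sizes.length 0) 0 0

-- ===== PRECONDITION & SPEC =====
-- Pre_ excludes exactly the inputs on which Python A raises IndexError (stsc[0] with
-- stsc empty, reached iff chunk_offsets and sample_sizes are both nonempty); B raises there too.
def Pre_build_sample_offsets_py (sample_sizes : List Int) (chunk_offsets : List Int)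
    (stsc : List (Int × Int)) : Prop :=
  ¬(stsc = [] ∧ chunk_offsets ≠ [] ∧ sample_sizes ≠ [])
instance (sample_sizes : List Int) (chunk_offsets : List Int) (stsc : List (Int × Int)) :
    Decidable (Pre_build_sample_offsets_py sample_sizes chunk_offsets stsc) := by
  unfold Pre_build_sample_offsets_py; infer_instance

def pvWitness_build_sample_offsets_py : List Int × List Int × (List (Int × Int)) :=
  ([3, 4, 5], [100, 200], [(1, 2)])

def Spec_build_sample_offsets_py (sample_sizes : List Int) (chunk_offsets : List Int)
    (stsc : List (Int × Int)) (out : List Int) : Prop :=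
  out = build_sample_offsets_py_alt sample_sizes chunk_offsets stsc
instance (sample_sizes : List Int) (chunk_offsets : List Int) (stsc : List (Int × Int))
    (out : List Int) : Decidable (Spec_build_sample_offsets_py sample_sizes chunk_offsets stsc out) := by
  unfold Spec_build_sample_offsets_py; infer_instance

-- ===== CLAIM (what is proved, stated in full; the proofs are below) =====
def Claim_equal_build_sample_offsets_py : Prop := ∀ (sample_sizes : List Int) (chunk_offsets : List Int) (stsc : List (Int × Int)), Dom_build_sample_offsets_py sample_sizes chunk_offsets stsc → Pre_build_sample_offsets_py sample_sizes chunk_offsets stsc → Spec_build_sample_offsets_py sample_sizes chunk_offsets stsc (build_sample_offsets_py sample_sizes chunk_offsets stsc)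

-- ===== LEMMAS AND PROOFS =====

-- abbreviation used only by the proofs: length of the stsc prefix whose first_chunk ≤ c
def pvL (stsc : List (Int × Int)) (c : Int) : Nat :=
  (stsc.takeWhile (fun e => decide (e.1 ≤ c))).length

lemma pvL_nil (c : Int) : pvL [] c = 0 := rfl

lemma pvL_cons (e : Int × Int) (t : List (Int × Int)) (c : Int) :
    pvL (e :: t) c = if e.1 ≤ c then pvL t c + 1 else 0 := by
  by_cases h : e.1 ≤ c
  · simp [pvL, List.takeWhile_cons_of_pos, h]
  · simp [pvL, List.takeWhile_cons_of_neg, h]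

lemma pvL_le_length (stsc : List (Int × Int)) (c : Int) : pvL stsc c ≤ stsc.length :=
  (List.takeWhile_prefix _).length_le

lemma pvL_mono (stsc : List (Int × Int)) {a b : Int} (h : a ≤ b) : pvL stsc a ≤ pvL stsc b := by
  induction stsc with
  | nil => simp [pvL_nil]
  | cons e t ih =>
    rw [pvL_cons, pvL_cons]
    by_cases h1 : e.1 ≤ a
    · rw [if_pos h1, if_pos (h1.trans h)]; omega
    · rw [if_neg h1]; omega

lemma pvL_getD {stsc : List (Int × Int)} {c : Int} {i : Nat} (h : i < pvL stsc c) :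
    (stsc.getD i (0, 0)).1 ≤ c := by
  induction stsc generalizing i with
  | nil => simp [pvL_nil] at h
  | cons e t ih =>
    rw [pvL_cons] at h
    by_cases h1 : e.1 ≤ c
    · cases i with
      | zero => simpa using h1
      | succ j =>
        rw [if_pos h1] at h
        simpa using ih (by omega)
    · rw [if_neg h1] at h; omega

lemma pvL_stop {stsc : List (Int × Int)} {c : Int} (h : pvL stsc c < stsc.length) :
    ¬ (stsc.getD (pvL stsc c) (0, 0)).1 ≤ c := by
  induction stsc with
  | nil => simp at h
  | cons e t ih =>
    rw [pvL_cons] at h ⊢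
    by_cases h1 : e.1 ≤ c
    · rw [if_pos h1] at h ⊢
      simpa using ih (by simpa using h)
    · rw [if_neg h1]
      simpa using h1

-- advB reaches exactly pvL when it starts at or below it
lemma advB_eq (stsc : List (Int × Int)) (c : Int) (k : Nat) (h : k ≤ pvL stsc c) :
    advB stsc c k = pvL stsc c := by
  fun_induction advB stsc c k with
  | case1 k hc ih =>
    apply ih
    rcases Nat.lt_or_ge k (pvL stsc c) with hk | hk
    · omega
    · exfalso
      have hkL : k = pvL stsc c := by omega
      exact pvL_stop (stsc := stsc) (c := c) (by omega) (hkL ▸ hc.2)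
  | case2 k hc =>
    rw [Classical.not_and_iff_not_or_not] at hc
    rcases hc with hc | hc
    · have := pvL_le_length stsc c; omega
    · rcases Nat.lt_or_ge k (pvL stsc c) with hk | hk
      · exact absurd (pvL_getD hk) hc
      · omega

-- the A-side scan returns the last element of the ≤-prefix (or cur if it breaks at once)
lemma spcGoA_eq (c : Int) (l : List (Int × Int)) (cur : Int × Int) :
    spcGoA c l cur = (l.takeWhile (fun e => decide (e.1 ≤ c))).getLastD cur := by
  induction l generalizing cur with
  | nil => simp [spcGoA]
  | cons e t ih =>
    by_cases h1 : e.1 ≤ c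
    · rw [List.takeWhile_cons_of_pos (by simpa using h1), List.getLastD_cons,
        spcGoA, if_pos h1, ih e]
    · rw [List.takeWhile_cons_of_neg (by simpa using h1), spcGoA, if_neg h1]
      rfl

lemma getLastD_eq_getD {α : Type} (l : List α) (d : α) (h : l ≠ []) :
    l.getLastD d = l.getD (l.length - 1) d := by
  induction l generalizing d with
  | nil => simp at h
  | cons a t ih =>
    cases t with
    | nil => rfl
    | cons b u =>
      rw [List.getLastD_cons, ih _ (by simp)]
      rw [List.getD_eq_getElem _ _ (by simp), List.getD_eq_getElem _ _ (by simp)]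
      simp

-- getD of a takeWhile prefix agrees with getD of the list inside the prefix
lemma getD_takeWhile {stsc : List (Int × Int)} {c : Int} {i : Nat} (d : Int × Int)
    (h : i < pvL stsc c) :
    (stsc.takeWhile (fun e => decide (e.1 ≤ c))).getD i d = stsc.getD i (0, 0) := by
  have hlen : i < stsc.length := h.trans_le (pvL_le_length stsc c)
  rw [List.getD_eq_getElem _ _ (by exact h), List.getD_eq_getElem _ _ hlen]
  exact (List.takeWhile_prefix _).getElem h

-- A's samples_per_chunk_for equals B's pointer lookup at k' = pvL
lemma spc_eq (stsc : List (Int × Int)) (c : Int) :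
    spcForA stsc c =
      (if 0 < pvL stsc c then (stsc.getD (pvL stsc c - 1) (0, 0)).2
       else (stsc.getD 0 (0, 0)).2) := by
  rw [spcForA, spcGoA_eq]
  by_cases h0 : 0 < pvL stsc c
  · have hne : stsc.takeWhile (fun e => decide (e.1 ≤ c)) ≠ [] := by
      intro h; rw [pvL, h] at h0; simp at h0
    rw [if_pos h0, getLastD_eq_getD _ _ hne]
    have : (stsc.takeWhile (fun e => decide (e.1 ≤ c))).length = pvL stsc c := rfl
    rw [this, getD_takeWhile _ (by omega)]
  · have htw0 : stsc.takeWhile (fun e => decide (e.1 ≤ c)) = [] :=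
      List.eq_nil_of_length_eq_zero (by rw [pvL] at h0; omega)
    rw [if_neg h0, htw0]
    cases stsc <;> rfl

-- the inner while loop is fillB with the closed-form take
def pvTake (sizes : List Int) (spc : Int) (si : Nat) (n : Int) : Nat :=
  if n < spc then min (spc - n).toNat (sizes.length - si) else 0

lemma innerA_eq (sizes : List Int) (spc : Int) (out : List Int) (off : Int) (si : Nat) (n : Int) :
    innerA sizes spc out off si n =
      (fillB sizes out off si (pvTake sizes spc si n), si + pvTake sizes spc si n) := by
  fun_induction innerA sizes spc out off si n with
  | case1 out off si n h ih =>
    have ht : pvTake sizes spc si n = pvTake sizes spc (si + 1) (n + 1) + 1 := by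
      simp only [pvTake]
      rw [if_pos h.1]
      by_cases h2 : n + 1 < spc
      · rw [if_pos h2]; omega
      · rw [if_neg h2]; omega
    rw [ih, ht]
    simp only [fillB]
    congr 1
    omega
  | case2 out off si n h =>
    have ht : pvTake sizes spc si n = 0 := by
      simp only [pvTake]
      split
      · omega
      · rfl
    simp [ht, fillB]

-- the main simulation: outer while loop of A = chunk fold of B, with the pointer invariant
lemma outer_eq (sizes co : List Int) (stsc : List (Int × Int)) :
    ∀ (rest : List Int) (chunk : Nat) (out : List Int) (si k : Nat),
      1 ≤ chunk → rest = co.drop (chunk - 1) → k ≤ pvL stsc (chunk : Int) →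
      outerA sizes co stsc out si chunk = loopB sizes stsc rest (chunk : Int) out si k := by
  intro rest
  induction rest with
  | nil =>
    intro chunk out si k h1 hdrop hk
    have hlen : co.length ≤ chunk - 1 := by
      by_contra h
      have := List.drop_eq_nil_iff.mp hdrop.symm
      omega
    rw [outerA, loopB, dif_neg (by omega)]
  | cons base rest ih =>
    intro chunk out si k h1 hdrop hk
    have hlt : chunk - 1 < co.length := by
      by_contra h
      rw [List.drop_eq_nil_iff.mpr (by omega)] at hdrop
      simp at hdrop
    have h2 : co[chunk - 1] :: co.drop (chunk - 1 + 1) = base :: rest := by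
      rw [← List.drop_eq_getElem_cons hlt]
      exact hdrop.symm
    have hbase : co.getD (chunk - 1) 0 = base := by
      rw [List.getD_eq_getElem co 0 hlt]
      injection h2
    have hrest : rest = co.drop (chunk + 1 - 1) := by
      rw [show chunk + 1 - 1 = chunk - 1 + 1 by omega]
      injection h2 with _ hr
      exact hr.symm
    rw [outerA, loopB]
    by_cases hsi : si < sizes.length
    · rw [dif_pos ⟨by omega, hsi⟩, if_neg (by omega)]
      have hadv : advB stsc (chunk : Int) k = pvL stsc (chunk : Int) := advB_eq _ _ _ hk
      have hcast : ((chunk + 1 : Nat) : Int) = (chunk : Int) + 1 := by push_cast; ring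
      have hk' : pvL stsc (chunk : Int) ≤ pvL stsc ((chunk + 1 : Nat) : Int) := by
        rw [hcast]; exact pvL_mono stsc (by omega)
      have := ih (chunk + 1)
        (fillB sizes out (co.getD (chunk - 1) 0) si
          (pvTake sizes (spcForA stsc (chunk : Int)) si 0))
        (si + pvTake sizes (spcForA stsc (chunk : Int)) si 0)
        (pvL stsc (chunk : Int)) (by omega) hrest hk'
      simp only [innerA_eq]
      rw [this, hcast, hbase, hadv]
      have htake : pvTake sizes (spcForA stsc (chunk : Int)) si 0 =
          (if 0 < (if 0 < pvL stsc (chunk : Int)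
                   then (stsc.getD (pvL stsc (chunk : Int) - 1) (0, 0)).2
                   else (stsc.getD 0 (0, 0)).2)
           then min (if 0 < pvL stsc (chunk : Int)
                     then (stsc.getD (pvL stsc (chunk : Int) - 1) (0, 0)).2
                     else (stsc.getD 0 (0, 0)).2).toNat (sizes.length - si) else 0) := by
        rw [← spc_eq]
        simp only [pvTake]
        split
        · rw [Int.sub_zero]
        · rfl
      rw [htake]
    · rw [dif_neg (by omega), if_pos (by omega)]

-- ===== VERDICT (by name: the statement is the Claim_ definition above) =====
theorem build_sample_offsets_py_spec : Claim_equal_build_sample_offsets_py := by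
  intro sample_sizes chunk_offsets stsc _ _
  unfold Spec_build_sample_offsets_py build_sample_offsets_py build_sample_offsets_py_alt
  have := outer_eq sample_sizes chunk_offsets stsc chunk_offsets 1
    (List.replicate sample_sizes.length 0) 0 0 (by omega) (by simp) (by omega)
  simpa using this
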